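-- pv_equiv track=rewrite | github.com/safpla/t2t | deeplycurious/utils/label_translate.py | _io2iobe
-- ===== SOURCE A (Python) =====
-- def _io2iobe(line, io_dict=None, iobe_dict=None):
--     if io_dict is None:
--         io_dict = {'I':'I', 'O':'O'}
--     if iobe_dict is None:
--         iobe_dict = {'I':'I', 'O':'O', 'B':'B', 'E':'E'}
--     iobe_line = []
--     start = 0
--     len_line = len(line)
--     while start < len_line:
--         if line[start] == io_dict['O']:
--             iobe_line.append(iobe_dict['O'])
--             start += 1
--         else:
--             stop = start + 1
--             while stop < len_line and line[stop] == io_dict['I']: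
--                 stop += 1
--             entity = [iobe_dict['I']] * (stop - start)
--             entity[-1] = iobe_dict['E']
--             entity[0] = iobe_dict['B']
--             iobe_line.extend(entity)
--             start = stop
--     return iobe_line
-- ===== SOURCE B (Python) =====
-- def _io2iobe(line, io_dict=None, iobe_dict=None):
--     if io_dict is None:
--         io_dict = {'I': 'I', 'O': 'O'}
--     if iobe_dict is None:
--         iobe_dict = {'I': 'I', 'O': 'O', 'B': 'B', 'E': 'E'}
--     n = len(line)
--     iobe_line = []
--     for i in range(n):
--         c = line[i]
--         if c == io_dict['O']:
--             iobe_line.append(iobe_dict['O'])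
--         elif i == 0 or line[i - 1] == io_dict['O'] or c != io_dict['I']:
--             iobe_line.append(iobe_dict['B'])
--         elif i == n - 1 or line[i + 1] != io_dict['I']:
--             iobe_line.append(iobe_dict['E'])
--         else:
--             iobe_line.append(iobe_dict['I'])
--     return iobe_line
-- ===== Notes on version B (the rewrite author's own statement) =====
-- stated objective: simpler
-- what changed: Replaces A's nested run-detection while-loops (find the end of each entity, build and patch an entity list) by one flat pass that classifies each position from its two neighbours: B at a run start, E at a run end, I inside, O otherwise.
-- outside the precondition, e.g. on _io2iobe(['a', 'x'], {'I': 'x', 'O': 'x'}, None): A returns ['B', 'E'], B returns ['B', 'O']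
import Mathlib
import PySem

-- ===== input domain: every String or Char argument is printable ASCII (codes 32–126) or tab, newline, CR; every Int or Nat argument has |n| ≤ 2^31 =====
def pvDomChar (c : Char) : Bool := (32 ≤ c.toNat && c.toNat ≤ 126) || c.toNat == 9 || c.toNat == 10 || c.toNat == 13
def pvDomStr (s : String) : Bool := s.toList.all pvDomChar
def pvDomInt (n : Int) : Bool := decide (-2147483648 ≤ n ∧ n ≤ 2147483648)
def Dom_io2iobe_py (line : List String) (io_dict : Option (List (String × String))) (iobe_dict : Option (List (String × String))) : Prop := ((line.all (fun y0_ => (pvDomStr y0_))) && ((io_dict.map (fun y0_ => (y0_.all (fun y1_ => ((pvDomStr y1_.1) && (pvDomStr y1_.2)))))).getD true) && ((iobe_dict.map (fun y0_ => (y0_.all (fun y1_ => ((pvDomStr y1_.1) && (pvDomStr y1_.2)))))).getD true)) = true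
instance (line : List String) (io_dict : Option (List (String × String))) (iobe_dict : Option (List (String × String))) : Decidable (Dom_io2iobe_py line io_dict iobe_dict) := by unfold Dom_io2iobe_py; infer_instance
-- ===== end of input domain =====

-- B replaces A's nested run-detection while-loops by one flat neighbour-inspecting pass (objective: simpler).

-- shared helpers: the default dicts of both Pythons, and d[k] (Python raises KeyError when the key is
-- missing; Pre_ excludes exactly those inputs, so the "" default is never the returned value's source)
def pvIoDefault : List (String × String) := [("I", "I"), ("O", "O")]
def pvIobeDefault : List (String × String) := [("I", "I"), ("O", "O"), ("B", "B"), ("E", "E")]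
def pvGetKey (d : List (String × String)) (k : String) : String :=
  ((PySem.Dict.mk d).get? k).getD ""

-- ===== PORT A =====
-- inner while: stop += 1 while stop < len(line) and line[stop] == io_dict['I']
def pyFindStop (line : List String) (ioI : String) (stop : Nat) : Nat :=
  if stop < line.length ∧ line.getD stop "" = ioI then pyFindStop line ioI (stop + 1) else stop
termination_by line.length - stop
decreasing_by omega

-- the lemma pyOuter's termination cites: the inner while never moves stop backwards
theorem pyFindStop_ge (line : List String) (ioI : String) (stop : Nat) :
    stop ≤ pyFindStop line ioI stop := by
  fun_induction pyFindStop with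
  | case1 s h ih => omega
  | case2 s h => omega

-- outer while over start; the mutable appends/extends to iobe_line become list construction
def pyOuter (line : List String) (ioO ioI bO bB bI bE : String) (start : Nat) : List String :=
  if h : start < line.length then
    if line.getD start "" = ioO then
      bO :: pyOuter line ioO ioI bO bB bI bE (start + 1)
    else
      let stop := pyFindStop line ioI (start + 1)
      let entity := List.replicate (stop - start) bI
      let entity := entity.set (entity.length - 1) bE   -- entity[-1] = iobe_dict['E'] (entity nonempty)
      let entity := entity.set 0 bB                     -- entity[0] = iobe_dict['B']
      entity ++ pyOuter line ioO ioI bO bB bI bE stop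
  else []
termination_by line.length - start
decreasing_by
  · omega
  · have := pyFindStop_ge line ioI (start + 1); omega

-- the dict lookups are hoisted out of the loop: inside Pre_ they return the same value every iteration
def io2iobe_py (line : List String) (io_dict : Option (List (String × String))) (iobe_dict : Option (List (String × String))) : List String :=
  let ioD := match io_dict with | none => pvIoDefault | some d => d
  let iobeD := match iobe_dict with | none => pvIobeDefault | some d => d
  pyOuter line (pvGetKey ioD "O") (pvGetKey ioD "I")
    (pvGetKey iobeD "O") (pvGetKey iobeD "B") (pvGetKey iobeD "I") (pvGetKey iobeD "E") 0

-- ===== PORT B =====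
-- the body of B's for-loop: classify position i from line[i-1], line[i], line[i+1]
def bTag (line : List String) (ioO ioI bO bB bI bE : String) (i : Nat) : String :=
  if line.getD i "" = ioO then bO
  else if i = 0 ∨ line.getD (i - 1) "" = ioO ∨ line.getD i "" ≠ ioI then bB
  else if i = line.length - 1 ∨ line.getD (i + 1) "" ≠ ioI then bE
  else bI

-- for i in range(n): append(tag) == map over range(n)
def io2iobe_py_alt (line : List String) (io_dict : Option (List (String × String))) (iobe_dict : Option (List (String × String))) : List String :=
  let ioD := match io_dict with | none => pvIoDefault | some d => d
  let iobeD := match iobe_dict with | none => pvIobeDefault | some d => d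
  (List.range line.length).map
    (bTag line (pvGetKey ioD "O") (pvGetKey ioD "I")
      (pvGetKey iobeD "O") (pvGetKey iobeD "B") (pvGetKey iobeD "I") (pvGetKey iobeD "E"))

-- ===== PRECONDITION & SPEC =====
-- Pre_ excludes (a) the inputs on which A raises KeyError (a tag key that some lookup needs is missing from the
-- given dict), and (b) io_dicts mapping 'I' and 'O' to the same label while the line holds a non-O token: there
-- A absorbs a following O-labelled token into the entity while B tags it O — a degenerate config no one would
-- specify, on which both values are defensible.
def Pre_io2iobe_py (line : List String) (io_dict : Option (List (String × String))) (iobe_dict : Option (List (String × String))) : Prop :=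
  line = [] ∨
  (let ioD := match io_dict with | none => pvIoDefault | some d => d
   let iobeD := match iobe_dict with | none => pvIobeDefault | some d => d
   let ioO := pvGetKey ioD "O"
   (ioD.map Prod.fst).contains "O" = true ∧
   ((∃ c ∈ line, c = ioO) → (iobeD.map Prod.fst).contains "O" = true) ∧
   ((∃ c ∈ line, c ≠ ioO) →
      ((iobeD.map Prod.fst).contains "B" = true ∧ (iobeD.map Prod.fst).contains "E" = true ∧
       (iobeD.map Prod.fst).contains "I" = true ∧ pvGetKey ioD "I" ≠ ioO)) ∧
   ((∃ c ∈ line.dropLast, c ≠ ioO) → (ioD.map Prod.fst).contains "I" = true))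
instance (line : List String) (io_dict : Option (List (String × String))) (iobe_dict : Option (List (String × String))) : Decidable (Pre_io2iobe_py line io_dict iobe_dict) := by unfold Pre_io2iobe_py; infer_instance

def pvWitness_io2iobe_py : List String × (Option (List (String × String))) × (Option (List (String × String))) :=
  (["I", "O", "x", "I"], none, none)

def Spec_io2iobe_py (line : List String) (io_dict : Option (List (String × String))) (iobe_dict : Option (List (String × String))) (out : List String) : Prop := out = io2iobe_py_alt line io_dict iobe_dict
instance (line : List String) (io_dict : Option (List (String × String))) (iobe_dict : Option (List (String × String))) (out : List String) : Decidable (Spec_io2iobe_py line io_dict iobe_dict out) := by unfold Spec_io2iobe_py; infer_instance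

-- ===== CLAIM (what is proved, stated in full; the proofs are below) =====
def Claim_equal_io2iobe_py : Prop := ∀ (line : List String) (io_dict : Option (List (String × String))) (iobe_dict : Option (List (String × String))), Dom_io2iobe_py line io_dict iobe_dict → Pre_io2iobe_py line io_dict iobe_dict → Spec_io2iobe_py line io_dict iobe_dict (io2iobe_py line io_dict iobe_dict)

-- ===== LEMMAS AND PROOFS =====

theorem pyFindStop_le (line : List String) (ioI : String) (stop : Nat) :
    stop ≤ line.length → pyFindStop line ioI stop ≤ line.length := by
  fun_induction pyFindStop with
  | case1 s h ih => intro _; exact ih (by omega)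
  | case2 s h => intro hs; exact hs

theorem pyFindStop_interior (line : List String) (ioI : String) (stop : Nat) :
    ∀ j, stop ≤ j → j < pyFindStop line ioI stop → line.getD j "" = ioI := by
  fun_induction pyFindStop with
  | case1 s h ih =>
      intro j h1 h2
      rcases Nat.eq_or_lt_of_le h1 with rfl | hlt
      · exact h.2
      · exact ih j hlt h2
  | case2 s h => intro j h1 h2; omega

theorem pyFindStop_exit (line : List String) (ioI : String) (stop : Nat) :
    ¬(pyFindStop line ioI stop < line.length ∧ line.getD (pyFindStop line ioI stop) "" = ioI) := by
  fun_induction pyFindStop with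
  | case1 s h ih => exact ih
  | case2 s h => exact h

-- the one entity-run of A equals B's tags on the same index range
theorem entity_eq (line : List String) (ioO ioI bO bB bI bE : String)
    (start stop : Nat) (hsl : start < line.length) (hss : start < stop) (hstop : stop ≤ line.length)
    (hne : line.getD start "" ≠ ioO)
    (hinv : start = 0 ∨ line.getD (start - 1) "" = ioO ∨ line.getD start "" ≠ ioI)
    (hint : ∀ j, start + 1 ≤ j → j < stop → line.getD j "" = ioI)
    (hexit : ¬(stop < line.length ∧ line.getD stop "" = ioI))
    (hioI : ioI ≠ ioO) :
    ((List.replicate (stop - start) bI).set ((List.replicate (stop - start) bI).length - 1) bE).set 0 bB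
      = (List.range' start (stop - start)).map (bTag line ioO ioI bO bB bI bE) := by
  apply List.ext_getElem
  · simp
  · intro m h1 h2
    simp only [List.length_set, List.length_replicate] at h1
    rw [List.getElem_set, List.getElem_set, List.getElem_replicate,
        List.getElem_map, List.getElem_range']
    simp only [List.length_replicate, one_mul]
    have htag : bTag line ioO ioI bO bB bI bE (start + m)
        = if 0 = m then bB else if stop - start - 1 = m then bE else bI := by
      by_cases hm0 : m = 0
      · subst hm0
        have hB : start = 0 ∨ line.getD (start - 1) "" = ioO ∨ line.getD start "" ≠ ioI := hinv
        unfold bTag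
        simp only [Nat.add_zero]
        rw [if_neg hne, if_pos hB]
        simp
      · have hj : line.getD (start + m) "" = ioI := hint (start + m) (by omega) (by omega)
        have hcO : line.getD (start + m) "" ≠ ioO := by rw [hj]; exact hioI
        have hnotB : ¬(start + m = 0 ∨ line.getD (start + m - 1) "" = ioO
            ∨ line.getD (start + m) "" ≠ ioI) := by
          push Not
          refine ⟨by omega, ?_, by rw [hj]⟩
          by_cases hp : start + m - 1 = start
          · rw [hp]; exact hne
          · rw [hint (start + m - 1) (by omega) (by omega)]; exact hioI
        unfold bTag
        rw [if_neg hcO, if_neg hnotB]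
        by_cases hlast : stop - start - 1 = m
        · have hE : start + m = line.length - 1 ∨ line.getD (start + m + 1) "" ≠ ioI := by
            have hsp : start + m + 1 = stop := by omega
            by_cases hsn : stop < line.length
            · exact Or.inr (by rw [hsp]; exact fun hI => hexit ⟨hsn, hI⟩)
            · exact Or.inl (by omega)
          rw [if_pos hE, if_neg (show ¬(0 = m) from fun h => hm0 h.symm), if_pos hlast]
        · have hnE : ¬(start + m = line.length - 1 ∨ line.getD (start + m + 1) "" ≠ ioI) := by
            push Not
            have hlt : start + m + 1 < stop := by omega
            exact ⟨by omega, hint (start + m + 1) (by omega) (by omega)⟩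
          rw [if_neg hnE, if_neg (show ¬(0 = m) from fun h => hm0 h.symm), if_neg hlast]
    rw [htag]

-- main loop correspondence: A's outer while from index start equals B's tags on [start, n)
theorem outer_eq (line : List String) (ioO ioI bO bB bI bE : String)
    (hcol : (∃ c ∈ line, c ≠ ioO) → ioI ≠ ioO) :
    ∀ k start, line.length - start ≤ k →
      (start < line.length → (start = 0 ∨ line.getD (start - 1) "" = ioO ∨ line.getD start "" ≠ ioI)) →
      pyOuter line ioO ioI bO bB bI bE start
        = (List.range' start (line.length - start)).map (bTag line ioO ioI bO bB bI bE) := by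
  intro k
  induction k with
  | zero =>
      intro start hk _
      rw [pyOuter, dif_neg (by omega)]
      have : line.length - start = 0 := by omega
      rw [this]; rfl
  | succ k ih =>
      intro start hk hinv
      by_cases hsl : start < line.length
      · have hinv' := hinv hsl
        rw [pyOuter, dif_pos hsl]
        have hrange : List.range' start (line.length - start)
            = start :: List.range' (start + 1) (line.length - (start + 1)) := by
          have : line.length - start = (line.length - (start + 1)) + 1 := by omega
          rw [this, List.range'_succ]
        by_cases hO : line.getD start "" = ioO
        · rw [if_pos hO, hrange, List.map_cons]
          congr 1
          · unfold bTag; rw [if_pos hO]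
          · exact ih (start + 1) (by omega) (fun _ => Or.inr (Or.inl (by simpa using hO)))
        · rw [if_neg hO]
          have hmem : line.getD start "" ∈ line := by
            rw [List.getD_eq_getElem line "" hsl]; exact List.getElem_mem hsl
          have hioI : ioI ≠ ioO := hcol ⟨_, hmem, hO⟩
          set stop := pyFindStop line ioI (start + 1) with hstop_def
          have hge : start + 1 ≤ stop := pyFindStop_ge line ioI (start + 1)
          have hle : stop ≤ line.length := pyFindStop_le line ioI (start + 1) (by omega)
          have hint := pyFindStop_interior line ioI (start + 1)
          have hexit := pyFindStop_exit line ioI (start + 1)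
          have hsplit : List.range' start (line.length - start)
              = List.range' start (stop - start) ++ List.range' stop (line.length - stop) := by
            have h := @List.range'_append start (stop - start) (line.length - stop) 1
            rw [show start + 1 * (stop - start) = stop by omega] at h
            rw [show line.length - start = (stop - start) + (line.length - stop) by omega, ← h]
          rw [hsplit, List.map_append]
          show ((List.replicate (stop - start) bI).set
              ((List.replicate (stop - start) bI).length - 1) bE).set 0 bB
              ++ pyOuter line ioO ioI bO bB bI bE stop = _ ++ _
          congr 1
          · exact entity_eq line ioO ioI bO bB bI bE start stop hsl (by omega) hle hO hinv'
              (fun j h1 h2 => hint j h1 h2) hexit hioI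
          · exact ih stop (by omega)
              (fun hs => Or.inr (Or.inr (fun hI => hexit ⟨hs, hI⟩)))
      · rw [pyOuter, dif_neg hsl]
        have : line.length - start = 0 := by omega
        rw [this]; rfl

-- wrapper: the whole-program correspondence for given effective dicts
theorem full_eq (line : List String) (ioD iobeD : List (String × String))
    (hcol : (∃ c ∈ line, c ≠ pvGetKey ioD "O") → pvGetKey ioD "I" ≠ pvGetKey ioD "O") :
    pyOuter line (pvGetKey ioD "O") (pvGetKey ioD "I") (pvGetKey iobeD "O") (pvGetKey iobeD "B")
        (pvGetKey iobeD "I") (pvGetKey iobeD "E") 0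
      = (List.range line.length).map
          (bTag line (pvGetKey ioD "O") (pvGetKey ioD "I") (pvGetKey iobeD "O")
            (pvGetKey iobeD "B") (pvGetKey iobeD "I") (pvGetKey iobeD "E")) := by
  rw [List.range_eq_range']
  have := outer_eq line (pvGetKey ioD "O") (pvGetKey ioD "I") (pvGetKey iobeD "O")
    (pvGetKey iobeD "B") (pvGetKey iobeD "I") (pvGetKey iobeD "E")
    hcol line.length 0 (by omega) (fun _ => Or.inl rfl)
  simpa using this

-- ===== VERDICT (by name: the statement is the Claim_ definition above) =====
theorem io2iobe_py_spec : Claim_equal_io2iobe_py := by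
  intro line io_dict iobe_dict _ hpre
  unfold Spec_io2iobe_py io2iobe_py io2iobe_py_alt
  by_cases hnil : line = []
  · subst hnil; simp [pyOuter]
  · have hpre' := hpre.resolve_left hnil
    exact full_eq line _ _ (fun h => (hpre'.2.2.1 h).2.2.2)
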